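-- pv_equiv track=rewrite | github.com/EvanSun96/codesignal | robinhoodprep.py | countSubsegments
-- ===== SOURCE A (Python) =====
-- def countSubsegments(A) :
--         count = 0
--         S = sum(A)
--         sum1 = 0
--         for i in range(0, len(A) - 2):
--             sum1 += A[i]
--             sum2 = 0
--             sum3 = S - sum1
--             for j in range(i + 1, len(A) - 1):
--                 sum2 += A[j]
--                 sum3 -= A[j]
--                 if sum1 <= sum2 and sum2 <= sum3:
--                     count += 1
--
--         return count
-- ===== SOURCE B (Python) =====
-- def _bisect(a, x, right):
--     lo, hi = 0, len(a)
--     while lo < hi: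
--         mid = (lo + hi) // 2
--         if a[mid] < x or (right and a[mid] == x):
--             lo = mid + 1
--         else:
--             hi = mid
--     return lo
--
--
-- def countSubsegments(A):
--     n = len(A)
--     P = [0]
--     t = 0
--     for x in A:
--         t += x
--         P.append(t)
--     S = t
--     count = 0
--     pre = []  # sorted list of prefix sums P[1..j-1]
--     for j in range(2, n):
--         v = P[j - 1]
--         pre.insert(_bisect(pre, v, True), v)
--         lo = _bisect(pre, 2 * P[j] - S, False)
--         hi = _bisect(pre, P[j] // 2, True)
--         if lo < hi:
--             count += hi - lo
--     return count
-- ===== Notes on version B (the rewrite author's own statement) =====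
-- stated objective: faster
-- what changed: Replaces the quadratic nested scan over all (i,j) cuts by one pass over prefix sums that keeps earlier prefix sums in a sorted list and counts, per right cut j, the admissible left cuts with two hand-written binary searches (the condition sum1<=sum2<=sum3 becomes 2*P[j]-S <= P[i] <= P[j]//2).
import Mathlib
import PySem

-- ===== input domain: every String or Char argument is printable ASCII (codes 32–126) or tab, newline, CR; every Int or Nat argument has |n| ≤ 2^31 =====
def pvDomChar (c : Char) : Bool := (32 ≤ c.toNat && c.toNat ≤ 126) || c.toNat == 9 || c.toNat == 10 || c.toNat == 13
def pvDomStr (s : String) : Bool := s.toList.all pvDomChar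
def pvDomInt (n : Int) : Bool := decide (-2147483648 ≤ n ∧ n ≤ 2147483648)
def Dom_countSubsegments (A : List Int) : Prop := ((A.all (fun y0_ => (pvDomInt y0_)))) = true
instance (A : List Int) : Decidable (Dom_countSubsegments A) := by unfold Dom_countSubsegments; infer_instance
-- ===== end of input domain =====

-- B replaces A's quadratic nested scan by one pass over prefix sums with a sorted
-- list of earlier prefix sums and two binary searches per right cut (same return value).

-- ===== PORT A =====
def countSubsegments (A : List Int) : Int :=
  let S : Int := A.sum
  let n : Int := A.length
  (((PySem.List.pyRange 0 (n - 2) 1).foldl (fun (st : Int × Int) i =>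
      let sum1 := st.2 + PySem.List.pyGetD A i 0      -- A[i]; i always in range here
      let inner := (PySem.List.pyRange (i + 1) (n - 1) 1).foldl
        (fun (t : Int × Int × Int) j =>
          let sum2 := t.2.1 + PySem.List.pyGetD A j 0  -- A[j]; j always in range here
          let sum3 := t.2.2 - PySem.List.pyGetD A j 0
          (if sum1 ≤ sum2 ∧ sum2 ≤ sum3 then t.1 + 1 else t.1, sum2, sum3))
        (st.1, 0, S - sum1)
      (inner.1, sum1))
    ((0 : Int), (0 : Int))).1)

-- ===== PORT B =====
-- the while-loop of _bisect; hi - lo shrinks each iteration, so fuel = a.length suffices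
def bisectAux (fuel : Nat) (a : List Int) (x : Int) (right : Bool) (lo hi : Int) : Int :=
  match fuel with
  | 0 => lo
  | Nat.succ f =>
    if lo < hi then
      let mid := PySem.Int.floordiv (lo + hi) 2
      if PySem.List.pyGetD a mid 0 < x ∨ (right = true ∧ PySem.List.pyGetD a mid 0 = x) then
        bisectAux f a x right (mid + 1) hi
      else
        bisectAux f a x right lo mid
    else lo

def pyBisect (a : List Int) (x : Int) (right : Bool) : Int :=
  bisectAux a.length a x right 0 (a.length : Int)

def countSubsegments_alt (A : List Int) : Int :=
  let n : Int := A.length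
  let pt := A.foldl (fun (st : List Int × Int) x => (st.1 ++ [st.2 + x], st.2 + x)) ([(0 : Int)], (0 : Int))
  let P := pt.1
  let S := pt.2
  (((PySem.List.pyRange 2 n 1).foldl (fun (st : Int × List Int) j =>
      let v := PySem.List.pyGetD P (j - 1) 0
      let pre := PySem.List.insert st.2 (pyBisect st.2 v true) v
      let lo := pyBisect pre (2 * PySem.List.pyGetD P j 0 - S) false
      let hi := pyBisect pre (PySem.Int.floordiv (PySem.List.pyGetD P j 0) 2) true
      (if lo < hi then st.1 + (hi - lo) else st.1, pre))
    ((0 : Int), ([] : List Int))).1)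

-- ===== PRECONDITION & SPEC =====
def Spec_countSubsegments (A : List Int) (out : Int) : Prop := out = countSubsegments_alt A
instance (A : List Int) (out : Int) : Decidable (Spec_countSubsegments A out) := by unfold Spec_countSubsegments; infer_instance

-- ===== CLAIM (what is proved, stated in full; the proofs are below) =====
def Claim_equal_countSubsegments : Prop := ∀ (A : List Int), Dom_countSubsegments A → Spec_countSubsegments A (countSubsegments A)

-- ===== LEMMAS AND PROOFS =====



-- prefix sum of the first k elements
def pf (A : List Int) (k : Nat) : Int := (A.take k).sum

-- the cut condition sum1 ≤ sum2 ≤ sum3 for left cut i and right cut j, in prefix-sum form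
abbrev condN (A : List Int) (i j : Nat) : Prop :=
  2 * pf A i ≤ pf A j ∧ 2 * pf A j ≤ A.sum + pf A i

-- 0/1 indicator of condN
def ic (A : List Int) (i j : Nat) : Int := if condN A i j then 1 else 0

theorem pf_zero (A : List Int) : pf A 0 = 0 := rfl

theorem pf_succ (A : List Int) (k : Nat) (hk : k < A.length) :
    pf A (k + 1) = pf A k + A[k] := by
  unfold pf
  rw [List.take_add_one, List.getElem?_eq_getElem hk, List.sum_append]
  simp only [Option.toList_some, List.sum_cons, List.sum_nil, add_zero]

-- ===== A-side loop characterisation =====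
theorem innerA (A : List Int) (i1 : Nat) (m : Nat) :
    ∀ (a : Nat) (c0 : Int), a + m ≤ A.length →
    ((PySem.List.pyRange (a : Int) ((a + m : Nat) : Int) 1).foldl
      (fun (t : Int × Int × Int) j =>
        let sum2 := t.2.1 + PySem.List.pyGetD A j 0
        let sum3 := t.2.2 - PySem.List.pyGetD A j 0
        (if pf A i1 ≤ sum2 ∧ sum2 ≤ sum3 then t.1 + 1 else t.1, sum2, sum3))
      (c0, pf A a - pf A i1, A.sum - pf A a))
    = (c0 + ∑ j ∈ Finset.Ico a (a + m), ic A i1 (j + 1),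
       pf A (a + m) - pf A i1, A.sum - pf A (a + m)) := by
  induction m with
  | zero =>
    intro a c0 h
    rw [Nat.add_zero, PySem.List.pyRange_one_eq_nil (le_refl _)]
    simp
  | succ m ih =>
    intro a c0 h
    have ha : a < A.length := by omega
    have hcast : ((a + (m + 1) : Nat) : Int) = (a : Int) + ((m : Int) + 1) := by push_cast; ring
    rw [hcast, PySem.List.pyRange_one_cons (by omega), List.foldl_cons]
    have hget : PySem.List.pyGetD A ((a : Nat) : Int) 0 = A[a] := by
      rw [PySem.List.pyGetD_natCast, List.getD_eq_getElem _ _ ha]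
    simp only [hget]
    have e2 : pf A a - pf A i1 + A[a] = pf A (a + 1) - pf A i1 := by
      rw [pf_succ A a ha]; ring
    have e3 : A.sum - pf A a - A[a] = A.sum - pf A (a + 1) := by
      rw [pf_succ A a ha]; ring
    have ecast1 : (a : Int) + 1 = ((a + 1 : Nat) : Int) := by push_cast; ring
    have ecast2 : (a : Int) + ((m : Int) + 1) = (((a + 1) + m : Nat) : Int) := by push_cast; ring
    simp only [e2, e3, ecast1, ecast2]
    rw [ih (a + 1) _ (by omega)]
    have hsplit : ∑ j ∈ Finset.Ico a (a + (m + 1)), ic A i1 (j + 1)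
        = ic A i1 (a + 1) + ∑ j ∈ Finset.Ico (a + 1) (a + 1 + m), ic A i1 (j + 1) := by
      have : a + (m + 1) = a + 1 + m := by omega
      rw [this, Finset.sum_eq_sum_Ico_succ_bot (by omega)]
    have harr : a + (m + 1) = a + 1 + m := by omega
    rw [hsplit, harr]
    have hcond : (pf A i1 ≤ pf A (a + 1) - pf A i1 ∧ pf A (a + 1) - pf A i1 ≤ A.sum - pf A (a + 1))
        ↔ condN A i1 (a + 1) := by
      unfold condN; constructor <;> (intro ⟨h1, h2⟩; exact ⟨by omega, by omega⟩)
    by_cases hc : condN A i1 (a + 1)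
    · rw [if_pos (hcond.mpr hc)]
      have hic : ic A i1 (a + 1) = 1 := by unfold ic; rw [if_pos hc]
      rw [hic]
      exact Prod.ext (by ring) rfl
    · rw [if_neg (fun hx => hc (hcond.mp hx))]
      have hic : ic A i1 (a + 1) = 0 := by unfold ic; rw [if_neg hc]
      rw [hic]
      exact Prod.ext (by ring) rfl
theorem outerA (A : List Int) (m : Nat) :
    ∀ (a : Nat) (c0 : Int), a + m + 2 ≤ A.length →
    (((PySem.List.pyRange (a : Nat) ((a + m : Nat) : Int) 1).foldl
      (fun (st : Int × Int) i =>
        let sum1 := st.2 + PySem.List.pyGetD A i 0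
        let inner := (PySem.List.pyRange (i + 1) ((A.length : Int) - 1) 1).foldl
          (fun (t : Int × Int × Int) j =>
            let sum2 := t.2.1 + PySem.List.pyGetD A j 0
            let sum3 := t.2.2 - PySem.List.pyGetD A j 0
            (if sum1 ≤ sum2 ∧ sum2 ≤ sum3 then t.1 + 1 else t.1, sum2, sum3))
          (st.1, 0, A.sum - sum1)
        (inner.1, sum1))
      (c0, pf A a)))
    = (c0 + ∑ i ∈ Finset.Ico a (a + m), ∑ j ∈ Finset.Ico (i + 1) (A.length - 1), ic A (i + 1) (j + 1),
       pf A (a + m)) := by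
  induction m with
  | zero =>
    intro a c0 h
    rw [Nat.add_zero, PySem.List.pyRange_one_eq_nil (le_refl _)]
    simp
  | succ m ih =>
    intro a c0 h
    have ha : a < A.length := by omega
    have hcast : ((a + (m + 1) : Nat) : Int) = (a : Int) + ((m : Int) + 1) := by push_cast; ring
    rw [hcast, PySem.List.pyRange_one_cons (by omega), List.foldl_cons]
    have hget : PySem.List.pyGetD A ((a : Nat) : Int) 0 = A[a] := by
      rw [PySem.List.pyGetD_natCast, List.getD_eq_getElem _ _ ha]
    simp only [hget]
    have e1 : pf A a + A[a] = pf A (a + 1) := by rw [pf_succ A a ha]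
    simp only [e1]
    -- inner loop via innerA
    set m' : Nat := A.length - a - 2 with hm'
    have ecast1 : (a : Int) + 1 = ((a + 1 : Nat) : Int) := by push_cast; ring
    have ecast3 : (A.length : Int) - 1 = (((a + 1) + m' : Nat) : Int) := by
      rw [hm']; push_cast; omega
    have hin := innerA A (a + 1) m' (a + 1) c0 (by omega)
    rw [sub_self, ← ecast3] at hin
    rw [ecast1, hin]
    have ecast2 : (a : Int) + ((m : Int) + 1) = (((a + 1) + m : Nat) : Int) := by push_cast; ring
    simp only [ecast2]
    rw [ih (a + 1) _ (by omega)]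
    have harr : a + (m + 1) = a + 1 + m := by omega
    have hsplit : ∑ i ∈ Finset.Ico a (a + (m + 1)), ∑ j ∈ Finset.Ico (i + 1) (A.length - 1), ic A (i + 1) (j + 1)
        = (∑ j ∈ Finset.Ico (a + 1) (A.length - 1), ic A (a + 1) (j + 1))
          + ∑ i ∈ Finset.Ico (a + 1) (a + 1 + m), ∑ j ∈ Finset.Ico (i + 1) (A.length - 1), ic A (i + 1) (j + 1) := by
      rw [harr, Finset.sum_eq_sum_Ico_succ_bot (by omega)]
    rw [hsplit, harr]
    have hup : a + 1 + m' = A.length - 1 := by omega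
    rw [hup, add_assoc]
theorem sum_Ico_shift (f : Nat → Int) (a b : Nat) :
    ∑ i ∈ Finset.Ico a b, f (i + 1) = ∑ i ∈ Finset.Ico (a + 1) (b + 1), f i :=
  Finset.sum_Ico_add' f a b 1

theorem inner_rect (A : List Int) (i : Nat) (hi : 1 ≤ i) :
    ∑ j ∈ Finset.Ico (i + 1) A.length, ic A i j
    = ∑ j ∈ Finset.Ico 1 A.length, (if i < j then ic A i j else 0) := by
  have hfil : Finset.Ico (i + 1) A.length
      = (Finset.Ico 1 A.length).filter (fun j => i < j) := by
    ext j; simp only [Finset.mem_Ico, Finset.mem_filter]; omega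
  rw [hfil, Finset.sum_filter]

theorem triangle_pad (A : List Int) (n : Nat) :
    ∑ i ∈ Finset.Ico 1 (n - 1), ∑ j ∈ Finset.Ico (i + 1) n, ic A i j
    = ∑ i ∈ Finset.Ico 1 n, ∑ j ∈ Finset.Ico (i + 1) n, ic A i j := by
  apply Finset.sum_subset
  · apply Finset.Ico_subset_Ico (le_refl _); omega
  · intro i hi hni
    simp only [Finset.mem_Ico] at hi hni
    have : Finset.Ico (i + 1) n = ∅ := by
      apply Finset.Ico_eq_empty; omega
    rw [this, Finset.sum_empty]

theorem A_eq_sum (A : List Int) :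
    countSubsegments A
    = ∑ i ∈ Finset.Ico 1 A.length, ∑ j ∈ Finset.Ico 1 A.length,
        (if i < j then ic A i j else 0) := by
  show (((PySem.List.pyRange 0 ((A.length : Int) - 2) 1).foldl _ ((0 : Int), (0 : Int))).1) = _
  by_cases hlen : A.length ≤ 2
  · rw [PySem.List.pyRange_one_eq_nil (by omega)]
    simp only [List.foldl_nil]
    symm
    apply Finset.sum_eq_zero
    intro i hi
    apply Finset.sum_eq_zero
    intro j hj
    simp only [Finset.mem_Ico] at hi hj
    rw [if_neg (by omega)]
  · set m : Nat := A.length - 2 with hm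
    have h := outerA A m 0 0 (by omega)
    rw [pf_zero, Nat.zero_add, Nat.cast_zero] at h
    have hc : ((A.length : Int) - 2) = ((m : Nat) : Int) := by omega
    rw [hc, h]
    -- now the sums
    have e1 : ∀ i : Nat, ∑ j ∈ Finset.Ico (i + 1) (A.length - 1), ic A (i + 1) (j + 1)
        = ∑ j ∈ Finset.Ico (i + 2) A.length, ic A (i + 1) j := by
      intro i
      rw [sum_Ico_shift (fun j => ic A (i + 1) j) (i + 1) (A.length - 1),
          show A.length - 1 + 1 = A.length from by omega]
    simp only [e1]
    rw [show (∑ i ∈ Finset.Ico 0 m, ∑ j ∈ Finset.Ico (i + 2) A.length, ic A (i + 1) j)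
        = ∑ i ∈ Finset.Ico 0 m, (fun i1 => ∑ j ∈ Finset.Ico (i1 + 1) A.length, ic A i1 j) (i + 1) from rfl]
    rw [sum_Ico_shift (fun i1 => ∑ j ∈ Finset.Ico (i1 + 1) A.length, ic A i1 j) 0 m]
    rw [Nat.zero_add, show m + 1 = A.length - 1 by omega]
    rw [triangle_pad, zero_add]
    apply Finset.sum_congr rfl
    intro i hi
    simp only [Finset.mem_Ico] at hi
    exact inner_rect A i hi.1
theorem pf_cons (a : Int) (A : List Int) (k : Nat) : pf (a :: A) (k + 1) = a + pf A k := by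
  simp [pf]

theorem prefix_build (A : List Int) : ∀ (L : List Int) (t : Int),
    A.foldl (fun (st : List Int × Int) x => (st.1 ++ [st.2 + x], st.2 + x)) (L, t)
    = (L ++ (List.range A.length).map (fun k => t + pf A (k + 1)), t + A.sum) := by
  induction A with
  | nil =>
    intro L t
    simp
  | cons a A ih =>
    intro L t
    simp only [List.foldl_cons]
    rw [ih (L ++ [t + a]) (t + a)]
    rw [List.length_cons, List.range_succ_eq_map]
    simp only [List.map_cons, List.map_map, List.sum_cons, Function.comp_def, Prod.mk.injEq]
    constructor
    · rw [List.append_assoc]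
      simp [pf_zero, pf_cons, add_assoc, Nat.succ_eq_add_one]
    · ring

theorem prefix_build' (A : List Int) :
    A.foldl (fun (st : List Int × Int) x => (st.1 ++ [st.2 + x], st.2 + x)) ([(0 : Int)], (0 : Int))
    = ((List.range (A.length + 1)).map (fun k => pf A k), A.sum) := by
  rw [prefix_build A [(0 : Int)] 0, List.range_succ_eq_map]
  simp [pf_zero]

def bQ (x : Int) (right : Bool) (y : Int) : Bool := if right then y ≤ x else y < x

theorem bQ_down (x : Int) (right : Bool) (y z : Int) (hyz : y ≤ z)
    (hz : bQ x right z = true) : bQ x right y = true := by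
  cases right <;> simp [bQ] at * <;> omega

theorem sorted_le (l : List Int) (hs : l.Pairwise (· ≤ ·)) (k j : Nat)
    (hj : j < l.length) (hkj : k ≤ j) : l[k]'(by omega) ≤ l[j] := by
  rcases Nat.eq_or_lt_of_le hkj with he | hlt
  · subst he; exact le_refl _
  · exact List.pairwise_iff_getElem.mp hs k j (by omega) hj hlt

theorem countP_of_split (l : List Int) (p : Int → Bool) (m : Nat)
    (hm : m ≤ l.length)
    (h1 : ∀ (k : Nat) (hk : k < l.length), k < m → p l[k] = true)
    (h2 : ∀ (k : Nat) (hk : k < l.length), m ≤ k → p l[k] = false) :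
    l.countP p = m := by
  conv_lhs => rw [← List.take_append_drop m l]
  rw [List.countP_append]
  have ht : (l.take m).countP p = (l.take m).length := by
    rw [List.countP_eq_length]
    intro y hy
    obtain ⟨k, hk, rfl⟩ := List.mem_iff_getElem.mp hy
    have hk2 : k < m ∧ k < l.length := by
      simp only [List.length_take] at hk; omega
    rw [List.getElem_take]
    exact h1 k hk2.2 hk2.1
  have hd : (l.drop m).countP p = 0 := by
    rw [List.countP_eq_zero]
    intro y hy
    obtain ⟨k, hk, rfl⟩ := List.mem_iff_getElem.mp hy
    have hk2 : m + k < l.length := by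
      simp only [List.length_drop] at hk; omega
    rw [List.getElem_drop]
    rw [h2 (m + k) hk2 (by omega)]
    simp
  rw [ht, hd, List.length_take]
  omega

theorem bisectAux_spec (a : List Int) (x : Int) (right : Bool) :
    ∀ (fuel : Nat) (lo hi : Int), a.Pairwise (· ≤ ·) →
    0 ≤ lo → lo ≤ hi → hi ≤ (a.length : Int) → (hi - lo).toNat ≤ fuel →
    (∀ (k : Nat) (hk : k < a.length), (k : Int) < lo → bQ x right a[k] = true) →
    (∀ (k : Nat) (hk : k < a.length), hi ≤ (k : Int) → bQ x right a[k] = false) →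
    bisectAux fuel a x right lo hi = (a.countP (bQ x right) : Int) ∧
    (∀ (k : Nat) (hk : k < a.length),
        (k : Int) < bisectAux fuel a x right lo hi → bQ x right a[k] = true) ∧
    (∀ (k : Nat) (hk : k < a.length),
        bisectAux fuel a x right lo hi ≤ (k : Int) → bQ x right a[k] = false) := by
  intro fuel
  induction fuel with
  | zero =>
    intro lo hi hs h0 hle hhi hfuel h1 h2
    have heq : lo = hi := by omega
    have hterm : a.countP (bQ x right) = lo.toNat := by
      apply countP_of_split a (bQ x right) lo.toNat (by omega)
      · intro k hk hklo
        exact h1 k hk (by omega)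
      · intro k hk hklo
        exact h2 k hk (by omega)
    have hred : bisectAux 0 a x right lo hi = lo := rfl
    rw [hred]
    refine ⟨by omega, ?_, ?_⟩
    · intro k hk hklt
      exact h1 k hk hklt
    · intro k hk hge
      exact h2 k hk (by omega)
  | succ f ihf =>
    intro lo hi hs h0 hle hhi hfuel h1 h2
    have hstep : bisectAux (f + 1) a x right lo hi
        = if lo < hi then
            (if PySem.List.pyGetD a (PySem.Int.floordiv (lo + hi) 2) 0 < x
                ∨ (right = true ∧ PySem.List.pyGetD a (PySem.Int.floordiv (lo + hi) 2) 0 = x)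
             then bisectAux f a x right (PySem.Int.floordiv (lo + hi) 2 + 1) hi
             else bisectAux f a x right lo (PySem.Int.floordiv (lo + hi) 2))
          else lo := rfl
    by_cases hlt : lo < hi
    · have hmb := PySem.Int.floordiv_two_mid_bounds (le_of_lt hlt)
      have hmidlt : PySem.Int.floordiv (lo + hi) 2 < hi := by
        have := (PySem.Int.floordiv_lt_iff_lt_mul (a := lo + hi) (b := 2) (q := hi)
          (by norm_num)).mpr (by omega)
        exact this
      set mid := PySem.Int.floordiv (lo + hi) 2 with hmid
      have hmid0 : 0 ≤ mid := by omega
      have hmidlen : mid < (a.length : Int) := by omega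
      have hmlt : mid.toNat < a.length := by omega
      have hget : PySem.List.pyGetD a mid 0 = a[mid.toNat] :=
        PySem.List.pyGetD_eq_getElem a 0 hmid0 hmidlen
      have hcond : (PySem.List.pyGetD a mid 0 < x
          ∨ (right = true ∧ PySem.List.pyGetD a mid 0 = x))
          ↔ bQ x right a[mid.toNat] = true := by
        rw [hget]; cases right <;> simp [bQ] <;> omega
      by_cases hc : bQ x right a[mid.toNat] = true
      · rw [hstep, if_pos hlt, if_pos (hcond.mpr hc)]
        apply ihf (mid + 1) hi hs (by omega) (by omega) hhi (by omega)
        · intro k hk hklt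
          apply bQ_down x right a[k] a[mid.toNat] ?_ hc
          exact sorted_le a hs k mid.toNat hmlt (by omega)
        · exact h2
      · rw [hstep, if_pos hlt, if_neg (fun hx => hc (hcond.mp hx))]
        apply ihf lo mid hs h0 (by omega) (by omega) (by omega) h1
        · intro k hk hge
          rcases Bool.eq_false_or_eq_true (bQ x right a[k]) with ht | hf
          · exfalso
            apply hc
            apply bQ_down x right a[mid.toNat] a[k] ?_ ht
            exact sorted_le a hs mid.toNat k hk (by omega)
          · exact hf
    · rw [hstep, if_neg hlt]
      have heq : lo = hi := by omega
      have hterm : a.countP (bQ x right) = lo.toNat := by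
        apply countP_of_split a (bQ x right) lo.toNat (by omega)
        · intro k hk hklo
          exact h1 k hk (by omega)
        · intro k hk hklo
          exact h2 k hk (by omega)
      refine ⟨by omega, ?_, ?_⟩
      · intro k hk hklt
        exact h1 k hk hklt
      · intro k hk hge
        exact h2 k hk (by omega)

theorem pyBisect_spec (a : List Int) (x : Int) (right : Bool)
    (hs : a.Pairwise (· ≤ ·)) :
    pyBisect a x right = (a.countP (bQ x right) : Int) ∧
    (∀ (k : Nat) (hk : k < a.length),
        (k : Int) < pyBisect a x right → bQ x right a[k] = true) ∧
    (∀ (k : Nat) (hk : k < a.length),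
        pyBisect a x right ≤ (k : Int) → bQ x right a[k] = false) := by
  apply bisectAux_spec a x right a.length 0 (a.length : Int) hs (le_refl _)
    (by omega) (le_refl _) (by omega)
  · intro k hk hklt
    omega
  · intro k hk hge
    omega

theorem insert_sorted (l : List Int) (v : Int) (m : Nat) (hm : m ≤ l.length)
    (hs : l.Pairwise (· ≤ ·))
    (h1 : ∀ (k : Nat) (hk : k < l.length), k < m → l[k] ≤ v)
    (h2 : ∀ (k : Nat) (hk : k < l.length), m ≤ k → v ≤ l[k]) :
    (l.take m ++ v :: l.drop m).Pairwise (· ≤ ·) := by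
  rw [List.pairwise_append]
  refine ⟨hs.sublist (List.take_sublist m l), ?_, ?_⟩
  · rw [List.pairwise_cons]
    refine ⟨?_, hs.sublist (List.drop_sublist m l)⟩
    intro y hy
    obtain ⟨k, hk, rfl⟩ := List.mem_iff_getElem.mp hy
    have hk2 : m + k < l.length := by
      simp only [List.length_drop] at hk; omega
    rw [List.getElem_drop]
    exact h2 (m + k) hk2 (by omega)
  · intro b hb y hy
    obtain ⟨k, hk, rfl⟩ := List.mem_iff_getElem.mp hb
    have hk2 : k < m ∧ k < l.length := by
      simp only [List.length_take] at hk; omega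
    rw [List.getElem_take]
    have hbv : l[k] ≤ v := h1 k hk2.2 hk2.1
    rcases List.mem_cons.mp hy with rfl | hy'
    · exact hbv
    · obtain ⟨k', hk', rfl⟩ := List.mem_iff_getElem.mp hy'
      have hk2' : m + k' < l.length := by
        simp only [List.length_drop] at hk'; omega
      rw [List.getElem_drop]
      exact le_trans hbv (h2 (m + k') hk2' (by omega))

theorem countP_le_split (l : List Int) (L U : Int) (h : L ≤ U) :
    l.countP (bQ U true)
      = l.countP (fun y => decide (L ≤ y) && decide (y ≤ U)) + l.countP (bQ L false) := by
  induction l with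
  | nil => simp
  | cons a t ih =>
    simp only [List.countP_cons, ih, bQ]
    by_cases h1 : a ≤ U <;> by_cases h2 : L ≤ a <;> by_cases h3 : a < L <;>
      simp [h1, h2, h3] <;> omega

theorem window_count (l : List Int) (L U c : Int) :
    (if (l.countP (bQ L false) : Int) < (l.countP (bQ U true) : Int)
       then c + ((l.countP (bQ U true) : Int) - (l.countP (bQ L false) : Int))
       else c)
    = c + (l.countP (fun y => decide (L ≤ y) && decide (y ≤ U)) : Int) := by
  by_cases hLU : L ≤ U
  · have key := countP_le_split l L U hLU
    by_cases hpos : 0 < l.countP (fun y => decide (L ≤ y) && decide (y ≤ U))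
    · rw [if_pos (by omega)]
      push_cast [key]
      ring
    · have h0 : l.countP (fun y => decide (L ≤ y) && decide (y ≤ U)) = 0 := by omega
      rw [if_neg (by omega), h0]
      simp
  · have hmono : l.countP (bQ U true) ≤ l.countP (bQ L false) := by
      apply List.countP_mono_left
      intro y hy hby
      simp [bQ] at *
      omega
    have h0 : l.countP (fun y => decide (L ≤ y) && decide (y ≤ U)) = 0 := by
      rw [List.countP_eq_zero]
      intro y hy
      simp
      intro hLy
      omega
    rw [if_neg (by omega), h0]
    simp

theorem list_countP_Ico (p : Nat → Bool) (m : Nat) :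
    ∀ (s : Nat), ((List.range' s m).countP p : Int)
      = ∑ i ∈ Finset.Ico s (s + m), (if p i then (1 : Int) else 0) := by
  induction m with
  | zero =>
    intro s
    simp
  | succ m ih =>
    intro s
    rw [Finset.sum_eq_sum_Ico_succ_bot (by omega)]
    have harr : s + (m + 1) = (s + 1) + m := by omega
    rw [harr, ← ih (s + 1)]
    simp only [List.range'_succ, List.countP_cons]
    by_cases hp : p s <;> simp [hp] <;> push_cast <;> ring

theorem Pget (A : List Int) (k : Nat) (hk : k < A.length + 1) :
    PySem.List.pyGetD ((List.range (A.length + 1)).map (fun k => pf A k)) ((k : Nat) : Int) 0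
      = pf A k := by
  rw [PySem.List.pyGetD_natCast]
  rw [List.getD_eq_getElem _ _ (by simp [hk])]
  simp

theorem cond_iff (A : List Int) (i a : Nat) :
    ((decide (2 * pf A a - A.sum ≤ pf A i)
        && decide (pf A i ≤ PySem.Int.floordiv (pf A a) 2)) = true)
      ↔ condN A i a := by
  simp only [Bool.and_eq_true, decide_eq_true_eq]
  unfold condN
  rw [PySem.Int.le_floordiv_iff_mul_le (by norm_num)]
  constructor <;> rintro ⟨u, w⟩ <;> exact ⟨by omega, by omega⟩

theorem loopB (A : List Int) (m : Nat) :
    ∀ (a : Nat) (c0 : Int) (pre : List Int), 2 ≤ a → a + m ≤ A.length →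
    pre.Pairwise (· ≤ ·) →
    pre.Perm ((List.range' 1 (a - 2)).map (fun k => pf A k)) →
    (((PySem.List.pyRange (a : Int) ((a + m : Nat) : Int) 1).foldl
      (fun (st : Int × List Int) j =>
        let v := PySem.List.pyGetD ((List.range (A.length + 1)).map (fun k => pf A k)) (j - 1) 0
        let pre := PySem.List.insert st.2 (pyBisect st.2 v true) v
        let lo := pyBisect pre (2 * PySem.List.pyGetD ((List.range (A.length + 1)).map (fun k => pf A k)) j 0 - A.sum) false
        let hi := pyBisect pre (PySem.Int.floordiv (PySem.List.pyGetD ((List.range (A.length + 1)).map (fun k => pf A k)) j 0) 2) true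
        (if lo < hi then st.1 + (hi - lo) else st.1, pre))
      (c0, pre)).1)
    = c0 + ∑ j ∈ Finset.Ico a (a + m), ∑ i ∈ Finset.Ico 1 j, ic A i j := by
  induction m with
  | zero =>
    intro a c0 pre h2a hle hsort hperm
    rw [PySem.List.pyRange_one_eq_nil
      (by push_cast; omega : ((a + 0 : Nat) : Int) ≤ ((a : Nat) : Int))]
    simp
  | succ m ih =>
    intro a c0 pre h2a hle hsort hperm
    have hcast : ((a + (m + 1) : Nat) : Int) = (a : Int) + ((m : Int) + 1) := by push_cast; ring
    rw [hcast, PySem.List.pyRange_one_cons (by omega), List.foldl_cons]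
    have hv1 : ((a : Nat) : Int) - 1 = ((a - 1 : Nat) : Int) := by omega
    have hv : PySem.List.pyGetD ((List.range (A.length + 1)).map (fun k => pf A k)) (((a : Nat) : Int) - 1) 0
        = pf A (a - 1) := by rw [hv1, Pget A (a - 1) (by omega)]
    have hpj : PySem.List.pyGetD ((List.range (A.length + 1)).map (fun k => pf A k)) ((a : Nat) : Int) 0
        = pf A a := Pget A a (by omega)
    simp only [hv, hpj]
    obtain ⟨hbv, hbv1, hbv2⟩ := pyBisect_spec pre (pf A (a - 1)) true hsort
    rw [hbv]
    have hcle : pre.countP (bQ (pf A (a - 1)) true) ≤ pre.length := List.countP_le_length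
    rw [PySem.List.insert_natCast pre _ _ hcle]
    set c := pre.countP (bQ (pf A (a - 1)) true) with hcdef
    set pre' := pre.take c ++ pf A (a - 1) :: pre.drop c with hpre'
    have hsort' : pre'.Pairwise (· ≤ ·) := by
      apply insert_sorted pre (pf A (a - 1)) c hcle hsort
      · intro k hk hkc
        have := hbv1 k hk (by rw [hbv]; exact_mod_cast Nat.cast_lt.mpr hkc)
        simpa [bQ] using this
      · intro k hk hkc
        have := hbv2 k hk (by rw [hbv]; exact_mod_cast Nat.cast_le.mpr hkc)
        simp [bQ] at this
        omega
    have hperm' : pre'.Perm ((List.range' 1 (a - 1)).map (fun k => pf A k)) := by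
      have p1 : pre'.Perm (pf A (a - 1) :: pre) := by
        rw [hpre']
        have := List.perm_middle (a := pf A (a - 1)) (l₁ := pre.take c) (l₂ := pre.drop c)
        rw [List.take_append_drop] at this
        exact this
      have p2 : (pf A (a - 1) :: pre).Perm
          (pf A (a - 1) :: (List.range' 1 (a - 2)).map (fun k => pf A k)) := hperm.cons _
      have p3 : ((List.range' 1 (a - 2)).map (fun k => pf A k) ++ [pf A (a - 1)]).Perm
          (pf A (a - 1) :: (List.range' 1 (a - 2)).map (fun k => pf A k)) :=
        List.perm_append_singleton _ _
      have e1 : List.range' 1 (a - 1) = List.range' 1 (a - 2) ++ [a - 1] := by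
        rw [show a - 1 = (a - 2) + 1 by omega, List.range'_1_concat,
            show 1 + (a - 2) = a - 2 + 1 by omega]
      have hr : (List.range' 1 (a - 1)).map (fun k => pf A k)
          = (List.range' 1 (a - 2)).map (fun k => pf A k) ++ [pf A (a - 1)] := by
        rw [e1, List.map_append]
        rfl
      rw [hr]
      exact (p1.trans p2).trans p3.symm
    obtain ⟨hlo, _, _⟩ := pyBisect_spec pre' (2 * pf A a - A.sum) false hsort'
    obtain ⟨hhi, _, _⟩ := pyBisect_spec pre' (PySem.Int.floordiv (pf A a) 2) true hsort'
    rw [hlo, hhi, window_count]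
    have hcnt : pre'.countP (fun y => decide (2 * pf A a - A.sum ≤ y)
          && decide (y ≤ PySem.Int.floordiv (pf A a) 2))
        = (List.range' 1 (a - 1)).countP (fun i => decide (2 * pf A a - A.sum ≤ pf A i)
          && decide (pf A i ≤ PySem.Int.floordiv (pf A a) 2)) := by
      rw [hperm'.countP_eq, List.countP_map]
      rfl
    have hsum : ((List.range' 1 (a - 1)).countP (fun i => decide (2 * pf A a - A.sum ≤ pf A i)
          && decide (pf A i ≤ PySem.Int.floordiv (pf A a) 2)) : Int)
        = ∑ i ∈ Finset.Ico 1 a, ic A i a := by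
      rw [list_countP_Ico _ (a - 1) 1]
      have h1a : 1 + (a - 1) = a := by omega
      rw [h1a]
      apply Finset.sum_congr rfl
      intro i _
      unfold ic
      by_cases hcnd : condN A i a
      · rw [if_pos ((cond_iff A i a).mpr hcnd), if_pos hcnd]
      · rw [if_neg (fun hx => hcnd ((cond_iff A i a).mp hx)), if_neg hcnd]
    have ecast1 : ((a : Nat) : Int) + 1 = ((a + 1 : Nat) : Int) := by push_cast; ring
    have ecast2 : ((a : Nat) : Int) + ((m : Int) + 1) = (((a + 1) + m : Nat) : Int) := by push_cast; ring
    rw [ecast1, ecast2]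
    rw [ih (a + 1) _ pre' (by omega) (by omega) hsort'
      (by rw [show (a + 1) - 2 = a - 1 by omega]; exact hperm')]
    rw [hcnt, hsum]
    rw [Finset.sum_eq_sum_Ico_succ_bot (a := a) (b := a + (m + 1)) (by omega)]
    rw [show a + (m + 1) = a + 1 + m by omega]
    ring

theorem B_eq_sum (A : List Int) :
    countSubsegments_alt A
    = ∑ j ∈ Finset.Ico 1 A.length, ∑ i ∈ Finset.Ico 1 A.length,
        (if i < j then ic A i j else 0) := by
  simp only [countSubsegments_alt, prefix_build' A]
  by_cases hlen : A.length < 2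
  · rw [PySem.List.pyRange_one_eq_nil (by omega)]
    simp only [List.foldl_nil]
    symm
    apply Finset.sum_eq_zero
    intro j hj
    simp only [Finset.mem_Ico] at hj
    omega
  · have hcast : (A.length : Int) = ((2 + (A.length - 2) : Nat) : Int) := by omega
    have hB := loopB A (A.length - 2) 2 0 [] (le_refl _) (by omega) List.Pairwise.nil (by simp)
    rw [show ((2 : Nat) : Int) = (2 : Int) from by norm_num] at hB
    rw [hcast, hB]
    rw [zero_add, show 2 + (A.length - 2) = A.length by omega]
    rw [show (∑ j ∈ Finset.Ico 2 A.length, ∑ i ∈ Finset.Ico 1 j, ic A i j)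
        = ∑ j ∈ Finset.Ico 1 A.length, ∑ i ∈ Finset.Ico 1 j, ic A i j from by
      apply Finset.sum_subset
      · apply Finset.Ico_subset_Ico (by omega) (le_refl _)
      · intro j hj hnj
        simp only [Finset.mem_Ico] at hj hnj
        have : j = 1 := by omega
        subst this
        simp]
    apply Finset.sum_congr rfl
    intro j hj
    simp only [Finset.mem_Ico] at hj
    have hfil : Finset.Ico 1 j = (Finset.Ico 1 A.length).filter (fun i => i < j) := by
      ext i; simp only [Finset.mem_Ico, Finset.mem_filter]; omega
    rw [hfil, Finset.sum_filter]

-- ===== VERDICT (by name: the statement is the Claim_ definition above) =====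
theorem countSubsegments_spec : Claim_equal_countSubsegments := by
  intro A _
  unfold Spec_countSubsegments
  rw [A_eq_sum, B_eq_sum]
  exact Finset.sum_comm
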